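-- pv_equiv track=rewrite | github.com/KehengZhu/SWMF-MCP-Server | src/swmf_mcp_server/tools/build_run.py | _extract_config_options
-- ===== SOURCE A (Python) =====
-- def _extract_config_options(help_block: str) -> list[dict[str, str]]:
--     options: list[dict[str, str]] = []
--     lines = help_block.splitlines()
--     for index, line in enumerate(lines):
--         stripped = line.strip()
--         if not stripped.startswith("-"):
--             continue
--         parts = stripped.split(None, 1)
--         name = parts[0]
--         summary = parts[1].strip() if len(parts) > 1 else ""
--         detail = []
--         for follow in lines[index + 1 :]:
--             follow_stripped = follow.strip()
--             if not follow_stripped: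
--                 break
--             if follow_stripped.startswith("-"):
--                 break
--             detail.append(follow_stripped)
--         options.append(
--             {
--                 "name": name,
--                 "summary": summary,
--                 "details": " ".join(detail).strip(),
--             }
--         )
--     return options
-- ===== SOURCE B (Python) =====
-- def _make_option(current):
--     name, summary, detail = current
--     return {"name": name, "summary": summary, "details": " ".join(detail).strip()}
--
--
-- def _extract_config_options(help_block: str) -> list[dict[str, str]]:
--     options: list[dict[str, str]] = []
--     current = None
--     collecting = False
--     for line in help_block.splitlines():
--         stripped = line.strip()
--         if stripped.startswith("-"):
--             if current is not None:
--                 options.append(_make_option(current))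
--             parts = stripped.split(None, 1)
--             current = (parts[0], parts[1].strip() if len(parts) > 1 else "", [])
--             collecting = True
--         elif not stripped:
--             collecting = False
--         elif collecting and current is not None:
--             current[2].append(stripped)
--     if current is not None:
--         options.append(_make_option(current))
--     return options
-- ===== Notes on version B (the rewrite author's own statement) =====
-- stated objective: alternative
-- what changed: Replaced the per-option rescan of all following lines by a single linear pass maintaining a current-option tuple and a boolean flag that gates detail accumulation.
import Mathlib
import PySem

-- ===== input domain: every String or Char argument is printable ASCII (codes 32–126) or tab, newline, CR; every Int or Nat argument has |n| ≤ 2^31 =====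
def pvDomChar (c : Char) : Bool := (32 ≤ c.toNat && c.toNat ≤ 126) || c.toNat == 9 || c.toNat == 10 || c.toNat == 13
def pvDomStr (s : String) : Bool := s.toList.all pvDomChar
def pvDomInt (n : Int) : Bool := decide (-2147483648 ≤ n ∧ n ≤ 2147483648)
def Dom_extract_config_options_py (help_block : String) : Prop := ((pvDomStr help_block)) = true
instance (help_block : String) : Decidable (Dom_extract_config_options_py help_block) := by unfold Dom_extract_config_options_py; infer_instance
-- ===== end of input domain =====

-- B replaces A's quadratic per-option rescan of the following lines by one linear pass
-- with a current-option accumulator and a boolean flag gating detail accumulation (single pass instead of rescans).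

-- shared by both ports: the option dict literal both Pythons build
def pvMkOpt (name summary : String) (detail : List String) : List (String × String) :=
  [("name", name), ("summary", summary),
   ("details", PySem.Str.strip (PySem.Str.join " " detail))]

-- shared by both ports: name/summary from a stripped dash line (parts = stripped.split(None, 1))
def pvNameSummary (stripped : String) : String × String :=
  let parts := PySem.Str.split₀Max stripped 1
  (parts.headD "",
   if parts.length > 1 then PySem.Str.strip (parts.getD 1 "") else "")

-- ===== PORT A =====
-- A's inner loop over lines[index+1:]: collect stripped lines until blank or '-'
def pvDetailA : List String → List String
  | [] => []
  | follow :: rest =>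
    let fs := PySem.Str.strip follow
    if fs = "" then []
    else if PySem.Str.startswith fs "-" then []
    else fs :: pvDetailA rest

-- A's outer loop; the structural tail 'rest' is lines[index+1:]
def pvGoA : List String → List (List (String × String))
  | [] => []
  | line :: rest =>
    let stripped := PySem.Str.strip line
    if !(PySem.Str.startswith stripped "-") then pvGoA rest
    else
      let ns := pvNameSummary stripped
      pvMkOpt ns.1 ns.2 (pvDetailA rest) :: pvGoA rest

def extract_config_options_py (help_block : String) : List (List (String × String)) :=
  pvGoA (PySem.Str.splitlines help_block)

-- ===== PORT B =====
-- finalize the current option, if any (Source B's guarded options.append(_make_option(current)))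
def pvFinalize (cur : Option (String × String × List String))
    (options : List (List (String × String))) : List (List (String × String)) :=
  match cur with
  | none => options
  | some (n, s, d) => options ++ [pvMkOpt n s d]

-- Source B's single loop: state = emitted options, current option, collecting flag
def pvGoB : List String → List (List (String × String)) →
    Option (String × String × List String) → Bool → List (List (String × String))
  | [], options, cur, _ => pvFinalize cur options
  | line :: rest, options, cur, col =>
    let stripped := PySem.Str.strip line
    if PySem.Str.startswith stripped "-" then
      let ns := pvNameSummary stripped
      pvGoB rest (pvFinalize cur options) (some (ns.1, ns.2, [])) true
    else if stripped = "" then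
      pvGoB rest options cur false
    else if col then
      pvGoB rest options (cur.map fun c => (c.1, c.2.1, c.2.2 ++ [stripped])) col
    else
      pvGoB rest options cur col

def extract_config_options_py_alt (help_block : String) : List (List (String × String)) :=
  pvGoB (PySem.Str.splitlines help_block) [] none false

-- ===== PRECONDITION & SPEC =====
def Spec_extract_config_options_py (help_block : String) (out : List (List (String × String))) : Prop := out = extract_config_options_py_alt help_block
instance (help_block : String) (out : List (List (String × String))) : Decidable (Spec_extract_config_options_py help_block out) := by unfold Spec_extract_config_options_py; infer_instance

-- ===== CLAIM (what is proved, stated in full; the proofs are below) =====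
def Claim_equal_extract_config_options_py : Prop := ∀ (help_block : String), Dom_extract_config_options_py help_block → Spec_extract_config_options_py help_block (extract_config_options_py help_block)

-- ===== LEMMAS AND PROOFS =====

-- loop invariant: B's state machine, run from any state, yields the already-emitted
-- options, then the current option (extended by A's detail scan iff collecting),
-- then A's options for the remaining lines
lemma pvGoB_eq (lines : List String) :
    ∀ (options : List (List (String × String)))
      (cur : Option (String × String × List String)) (col : Bool),
    pvGoB lines options cur col =
      options ++
        (match cur with
         | none => pvGoA lines
         | some (n, s, d) =>
             pvMkOpt n s (if col then d ++ pvDetailA lines else d) :: pvGoA lines) := by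
  induction lines with
  | nil =>
    intro options cur col
    cases cur with
    | none => simp [pvGoB, pvFinalize, pvGoA]
    | some c =>
      obtain ⟨n, s, d⟩ := c
      simp [pvGoB, pvFinalize, pvGoA, pvDetailA]
  | cons line rest ih =>
    intro options cur col
    by_cases hdash : ['-'] <+: PySem.Chars.strip line.toList
    · cases cur with
      | none => simp [pvGoB, pvGoA, pvFinalize, PySem.Chars.startswith, hdash, ih]
      | some c =>
        obtain ⟨n, s, d⟩ := c
        simp [pvGoB, pvGoA, pvFinalize, pvDetailA, PySem.Chars.startswith, hdash, ih]
    · by_cases hblank : PySem.Str.strip line = ""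
      · have hblank' : PySem.Chars.strip line.toList = [] := by
          have := congrArg String.toList hblank
          simpa using this
        cases cur with
        | none => simp [pvGoB, pvGoA, pvDetailA, hdash, hblank, hblank', PySem.Chars.startswith, ih]
        | some c =>
          obtain ⟨n, s, d⟩ := c
          simp [pvGoB, pvGoA, pvDetailA, pvFinalize, hdash, hblank, hblank', PySem.Chars.startswith, ih]
      · have hblank' : ¬ PySem.Chars.strip line.toList = [] := by
          intro h
          apply hblank
          have : (PySem.Str.strip line).toList = ("" : String).toList := by simpa using h
          exact String.toList_inj.mp this
        cases cur with
        | none =>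
          cases col <;> simp [pvGoB, pvGoA, pvDetailA, hdash, hblank, hblank', PySem.Chars.startswith, ih]
        | some c =>
          obtain ⟨n, s, d⟩ := c
          cases col <;>
            simp [pvGoB, pvGoA, pvDetailA, pvFinalize, hdash, hblank, hblank', PySem.Chars.startswith, ih]

-- ===== VERDICT (by name: the statement is the Claim_ definition above) =====
theorem extract_config_options_py_spec : Claim_equal_extract_config_options_py := by
  intro help_block _
  unfold Spec_extract_config_options_py extract_config_options_py extract_config_options_py_alt
  rw [pvGoB_eq]
  simp
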